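-- pv_equiv track=rewrite | github.com/AlonMarko/Intro_Python_Course | Nonogram-Ex8/nonogram.py | get_intersection_row
-- ===== SOURCE A (Python) =====
-- UNKNOWN = -1
--
-- def rotate_rows(rows):
--     """
--     reverses the given nested list with each new list is built from the items
--     in the same index in all the lists accordignly
--     does not change the original rows.
--     :param rows: list of lists
--     :return: the rotated list of lists
--     """
--     rotated = list(zip(*rows))
--     return rotated
--
-- def get_intersection_row(rows):
--     """
--     gets a list of lists and returns one list build from the intersections of
--     all the lists, if in the same index all lists have the same value,
--     the value will be the same in the returned list, else it will be -1
--     :param rows: list of lists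
--     :return: list of ints, represents all intersections
--     """
--     rotated = rotate_rows(rows)
--     intersection_lst = []
--     for index, row in enumerate(rotated):
--         if row.count(row[0]) == len(row):
--             intersection_lst.append(row[0])
--         else:
--             intersection_lst.append(UNKNOWN)
--     return intersection_lst
-- ===== SOURCE B (Python) =====
-- def get_intersection_row(rows):
--     """Row-by-row fold: maintain a running per-column intersection instead of
--     transposing and scanning each column (same return value)."""
--     if not rows:
--         return []
--     m = min(len(r) for r in rows)
--     result = list(rows[0][:m])
--     for r in rows[1:]:
--         result = [x if x == y else -1 for x, y in zip(result, r)]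
--     return result
-- ===== Notes on version B (the rewrite author's own statement) =====
-- stated objective: alternative
-- what changed: B never transposes: it clamps the first row to the minimum row length and folds each later row into a running per-column intersection, replacing A's zip(*rows) transpose plus per-column count scan.
import Mathlib
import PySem

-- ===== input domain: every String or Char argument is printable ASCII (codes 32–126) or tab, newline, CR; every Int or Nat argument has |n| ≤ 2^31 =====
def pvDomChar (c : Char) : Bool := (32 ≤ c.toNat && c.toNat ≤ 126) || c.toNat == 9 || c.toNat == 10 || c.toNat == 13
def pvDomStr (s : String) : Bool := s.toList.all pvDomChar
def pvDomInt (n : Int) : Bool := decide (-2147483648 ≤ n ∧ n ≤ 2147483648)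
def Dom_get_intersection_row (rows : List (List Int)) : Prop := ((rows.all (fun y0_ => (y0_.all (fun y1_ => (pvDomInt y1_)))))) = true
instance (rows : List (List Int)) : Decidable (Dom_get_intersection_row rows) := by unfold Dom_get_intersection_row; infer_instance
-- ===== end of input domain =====

-- B replaces A's transpose-then-scan-each-column with a single row-by-row fold
-- maintaining a running per-column intersection (objective: alternative).


-- ===== PORT A =====
-- zip(*rows): tuples of heads until the shortest row is exhausted (exact Python zip behaviour)
def pvRotateRows (rows : List (List Int)) : List (List Int) :=
  match rows with
  | [] => []
  | r0 :: rest =>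
    if r0.isEmpty || rest.any (·.isEmpty) then []
    else (r0.headD 0 :: rest.map (·.headD 0)) :: pvRotateRows (r0.tail :: rest.map (·.tail))
  termination_by (rows.headD []).length
  decreasing_by
    simp_all
    rcases r0 with _ | ⟨a, t⟩ <;> simp_all

-- row[0] is ported as headD 0: every tuple produced by zip(*rows) is nonempty, so it is never the default
def get_intersection_row (rows : List (List Int)) : List Int :=
  (pvRotateRows rows).foldl
    (fun acc row => acc ++ [if PySem.List.count row (row.headD 0) = row.length then row.headD 0 else -1]) []

-- ===== PORT B =====
def get_intersection_row_alt (rows : List (List Int)) : List Int :=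
  match rows with
  | [] => []
  | r0 :: rest =>
    let m := rest.foldl (fun a r => min a r.length) r0.length
    rest.foldl (fun res r => (res.zip r).map (fun p => if p.1 = p.2 then p.1 else -1)) (r0.take m)

-- ===== PRECONDITION & SPEC =====
def Spec_get_intersection_row (rows : List (List Int)) (out : List Int) : Prop := out = get_intersection_row_alt rows
instance (rows : List (List Int)) (out : List Int) : Decidable (Spec_get_intersection_row rows out) := by unfold Spec_get_intersection_row; infer_instance

-- ===== CLAIM (what is proved, stated in full; the proofs are below) =====
def Claim_equal_get_intersection_row : Prop := ∀ (rows : List (List Int)), Dom_get_intersection_row rows → Spec_get_intersection_row rows (get_intersection_row rows)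

-- ===== LEMMAS AND PROOFS =====

-- minimum length of the rows (accumulator form, mirrors both ports' needs)
def pvM (a : Nat) (l : List (List Int)) : Nat := l.foldl (fun a r => min a r.length) a

theorem pvM_cons (a : Nat) (r : List Int) (l : List (List Int)) :
    pvM a (r :: l) = pvM (min a r.length) l := rfl

theorem pvM_le (a : Nat) (l : List (List Int)) : pvM a l ≤ a := by
  induction l generalizing a with
  | nil => simp [pvM]
  | cons r l ih =>
    calc pvM a (r :: l) = pvM (min a r.length) l := rfl
      _ ≤ min a r.length := ih _
      _ ≤ a := Nat.min_le_left _ _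

theorem pvM_le_mem (a : Nat) (l : List (List Int)) (r : List Int) (h : r ∈ l) :
    pvM a l ≤ r.length := by
  induction l generalizing a with
  | nil => simp at h
  | cons s l ih =>
    rcases List.mem_cons.mp h with h | h
    · subst h
      calc pvM a (r :: l) = pvM (min a r.length) l := rfl
        _ ≤ min a r.length := pvM_le _ _
        _ ≤ r.length := Nat.min_le_right _ _
    · exact ih _ h

theorem pvM_tails (a : Nat) (l : List (List Int)) (ha : 1 ≤ a)
    (h : ∀ r ∈ l, r ≠ []) :
    pvM (a - 1) (l.map (·.tail)) = pvM a l - 1 := by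
  induction l generalizing a with
  | nil => simp [pvM]
  | cons r l ih =>
    have hr : r ≠ [] := h r (by simp)
    have : min (a - 1) r.tail.length = min a r.length - 1 := by
      rcases r with _ | ⟨x, t⟩
      · simp at hr
      · simp only [List.tail_cons, List.length_cons]
        omega
    simp only [List.map_cons, pvM_cons, this]
    have hr1 : 1 ≤ r.length := by rcases r with _ | _ <;> simp_all
    exact ih _ (by omega) (fun s hs => h s (by simp [hs]))

theorem pvM_zero_of_mem_nil (a : Nat) (l : List (List Int)) (r : List Int)
    (h : r ∈ l) (hr : r = []) : pvM a l = 0 := by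
  induction l generalizing a with
  | nil => simp at h
  | cons s l ih =>
    rcases List.mem_cons.mp h with hh | hh
    · have : Nat.min a s.length = 0 := by subst hh hr; simp
      simp [pvM_cons, this]
      have := pvM_le 0 l
      omega
    · exact ih _ hh

theorem getD_zero_headD (l : List Int) : l.getD 0 0 = l.headD 0 := by
  rcases l with _ | ⟨x, t⟩ <;> simp

-- pvM is positive when the seed is and no row is empty
theorem pvM_pos (a : Nat) (l : List (List Int)) (ha : 1 ≤ a) (h : ∀ r ∈ l, r ≠ []) :
    1 ≤ pvM a l := by
  induction l generalizing a with
  | nil => simpa [pvM]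
  | cons s l ih =>
    have hs : s ≠ [] := h s (by simp)
    have hs1 : 1 ≤ s.length := by rcases s with _ | _ <;> simp_all
    rw [pvM_cons]
    exact ih _ (by omega) (fun r hr => h r (by simp [hr]))

-- characterization of the transpose: column i holds the i-th entry of every row
theorem pvRotateRows_eq_aux (n : Nat) : ∀ (r0 : List Int) (rest : List (List Int)),
    r0.length ≤ n →
    pvRotateRows (r0 :: rest) =
      (List.range (pvM r0.length rest)).map
        (fun i => r0.getD i 0 :: rest.map (·.getD i 0)) := by
  induction n with
  | zero =>
    intro r0 rest h
    have h0 : r0 = [] := by rcases r0 with _ | _ <;> simp_all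
    subst h0
    rw [pvRotateRows]
    have h0 : pvM 0 rest = 0 := Nat.le_zero.mp (pvM_le 0 rest)
    simp [h0]
  | succ n ih =>
    intro r0 rest hn
    rw [pvRotateRows]
    by_cases hemp : (r0.isEmpty || rest.any (·.isEmpty)) = true
    · rw [if_pos hemp]
      rcases Bool.or_eq_true_iff.mp hemp with h | h
      · have h0 : r0.length = 0 := by simpa [List.isEmpty_iff_length_eq_zero] using h
        have : pvM r0.length rest = 0 := by
          have := pvM_le r0.length rest; omega
        simp [this]
      · rcases List.any_eq_true.mp h with ⟨r, hr, hre⟩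
        have : pvM r0.length rest = 0 :=
          pvM_zero_of_mem_nil _ _ r hr (by simpa [List.isEmpty_iff] using hre)
        simp [this]
    · rw [if_neg hemp]
      simp only [Bool.or_eq_true, not_or, List.any_eq_true, not_exists] at hemp
      obtain ⟨h0, hr⟩ := hemp
      have h0' : r0 ≠ [] := by simpa [List.isEmpty_iff] using h0
      have hrne : ∀ r ∈ rest, r ≠ [] := by
        intro r hm
        have := hr r
        simp [hm, List.isEmpty_iff] at this ⊢
        exact this
      have h01 : 1 ≤ r0.length := by rcases r0 with _ | _ <;> simp_all
      have htn : r0.tail.length ≤ n := by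
        rcases r0 with _ | _ <;> simp_all
      have htl : pvM r0.tail.length (rest.map (·.tail)) = pvM r0.length rest - 1 := by
        have ht : r0.tail.length = r0.length - 1 := by
          rcases r0 with _ | _ <;> simp_all
        rw [ht]; exact pvM_tails _ _ h01 hrne
      have hm1 : 1 ≤ pvM r0.length rest := pvM_pos _ _ h01 hrne
      rw [ih r0.tail (rest.map (·.tail)) htn, htl]
      have hsucc : pvM r0.length rest = (pvM r0.length rest - 1) + 1 := by omega
      rw [hsucc, List.range_succ_eq_map]
      simp only [List.map_cons, List.map_map, Nat.add_sub_cancel]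
      refine List.cons_eq_cons.mpr ⟨?_, ?_⟩
      · exact List.cons_eq_cons.mpr ⟨(getD_zero_headD r0).symm,
          List.map_congr_left (fun a _ => (getD_zero_headD a).symm)⟩
      · apply List.map_congr_left
        intro i hi
        simp [Function.comp]

theorem pvRotateRows_eq (r0 : List Int) (rest : List (List Int)) :
    pvRotateRows (r0 :: rest) =
      (List.range (pvM r0.length rest)).map
        (fun i => r0.getD i 0 :: rest.map (·.getD i 0)) :=
  pvRotateRows_eq_aux r0.length r0 rest (le_refl _)

-- foldl-append is map
theorem foldl_append_map (g : List Int → Int) (cols : List (List Int)) (acc : List Int) :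
    cols.foldl (fun acc col => acc ++ [g col]) acc = acc ++ cols.map g := by
  induction cols generalizing acc with
  | nil => simp
  | cons c l ih => simp [ih]

-- scalar intersection fold
theorem scalar_fold_neg (vs : List Int) :
    vs.foldl (fun x y => if x = y then x else -1) (-1) = -1 := by
  induction vs with
  | nil => rfl
  | cons v vs ih =>
    have h : (if (-1 : Int) = v then (-1 : Int) else -1) = -1 := by split <;> rfl
    simp only [List.foldl_cons, h, ih]

theorem scalar_fold (vs : List Int) (v0 : Int) :
    vs.foldl (fun x y => if x = y then x else -1) v0 =
      if vs.all (fun y => y = v0) then v0 else -1 := by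
  induction vs with
  | nil => simp
  | cons v vs ih =>
    simp only [List.foldl_cons, List.all_cons]
    by_cases h : v0 = v
    · subst h
      rw [if_pos rfl, ih]
      simp
    · rw [if_neg h, scalar_fold_neg]
      have hd : (decide (v = v0)) = false := by
        simp only [decide_eq_false_iff_not]
        exact fun hc => h hc.symm
      simp [hd]

theorem getD_range_map (f : Nat → Int) (m i : Nat) (hi : i < m) :
    ((List.range m).map f).getD i 0 = f i := by
  rw [List.getD_eq_getElem?_getD]
  simp [hi]

theorem self_eq_range_map_getD (acc : List Int) (m : Nat) (h : acc.length = m) :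
    acc = (List.range m).map (fun i => acc.getD i 0) := by
  apply List.ext_getElem
  · simp [h]
  · intro i h1 h2
    simp only [List.getElem_map, List.getElem_range]
    rw [List.getD_eq_getElem?_getD, List.getElem?_eq_getElem (by omega)]
    rfl

-- B's fold, pointwise
theorem fold_merge (l : List (List Int)) (m : Nat) (acc : List Int)
    (hlen : acc.length = m) (hml : ∀ r ∈ l, m ≤ r.length) :
    l.foldl (fun res r => (res.zip r).map (fun p => if p.1 = p.2 then p.1 else -1)) acc =
      (List.range m).map
        (fun i => l.foldl (fun x r => if x = r.getD i 0 then x else -1) (acc.getD i 0)) := by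
  induction l generalizing acc with
  | nil => simpa using self_eq_range_map_getD acc m hlen
  | cons r l ih =>
    have hmr : m ≤ r.length := hml r (by simp)
    have hmerge : (acc.zip r).map (fun p => if p.1 = p.2 then p.1 else -1) =
        (List.range m).map (fun i => if acc.getD i 0 = r.getD i 0 then acc.getD i 0 else -1) := by
      apply List.ext_getElem
      · simp [hlen]; omega
      · intro i h1 h2
        simp only [List.length_map, List.length_zip, hlen] at h1
        have him : i < m := by omega
        simp only [List.getElem_map, List.getElem_range, List.getElem_zip]
        rw [List.getD_eq_getElem?_getD, List.getElem?_eq_getElem (by omega),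
            List.getD_eq_getElem?_getD, List.getElem?_eq_getElem (by omega)]
        rfl
    rw [List.foldl_cons, hmerge, ih _ (by simp) (fun s hs => hml s (by simp [hs]))]
    apply List.map_congr_left
    intro i hi
    have him : i < m := List.mem_range.mp hi
    rw [getD_range_map _ _ _ him, List.foldl_cons]

theorem getD_take (l : List Int) (m i : Nat) (hi : i < m) :
    (l.take m).getD i 0 = l.getD i 0 := by
  rw [List.getD_eq_getElem?_getD, List.getD_eq_getElem?_getD, List.getElem?_take_of_lt hi]

-- fold over rows of the i-th entries = fold over the mapped entry list
theorem foldl_map_getD (i : Nat) (l : List (List Int)) (b : Int) :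
    l.foldl (fun x r => if x = r.getD i 0 then x else -1) b
      = (l.map (fun r => r.getD i 0)).foldl (fun x y => if x = y then x else -1) b := by
  induction l generalizing b with
  | nil => rfl
  | cons r l ih => simp only [List.map_cons, List.foldl_cons, ih]

-- all-equal vs count
theorem count_cond (v0 : Int) (vs : List Int) :
    (PySem.List.count (v0 :: vs) v0 = (v0 :: vs).length) ↔ (vs.all (fun y => y = v0) = true) := by
  rw [PySem.List.count_eq]
  constructor
  · intro h
    have := List.count_eq_length.mp h
    simp only [List.all_eq_true]
    intro y hy
    have := this y (by simp [hy])
    simp [this]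
  · intro h
    apply List.count_eq_length.mpr
    intro b hb
    rcases List.mem_cons.mp hb with h1 | h1
    · simp [h1]
    · have := List.all_eq_true.mp h b h1
      simp_all

-- ===== VERDICT (by name: the statement is the Claim_ definition above) =====
theorem get_intersection_row_spec : Claim_equal_get_intersection_row := by
  intro rows _
  unfold Spec_get_intersection_row
  rcases rows with _ | ⟨r0, rest⟩
  · unfold get_intersection_row get_intersection_row_alt
    rw [pvRotateRows]
    rfl
  · unfold get_intersection_row get_intersection_row_alt
    rw [pvRotateRows_eq r0 rest, foldl_append_map]
    simp only [List.nil_append, List.map_map]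
    have hm : rest.foldl (fun a r => min a r.length) r0.length = pvM r0.length rest := rfl
    rw [hm]
    set m := pvM r0.length rest with hmdef
    have hm0 : m ≤ r0.length := pvM_le _ _
    rw [fold_merge rest m (r0.take m) (by simp [hm0]) (fun r hr => pvM_le_mem _ _ r hr)]
    apply List.map_congr_left
    intro i hi
    have him : i < m := List.mem_range.mp hi
    simp only [Function.comp]
    rw [getD_take _ _ _ him, foldl_map_getD, scalar_fold]
    rw [List.headD_cons]
    have hiff := count_cond (r0.getD i 0) (rest.map (fun r => r.getD i 0))
    by_cases hall : ((rest.map (fun r => r.getD i 0)).all (fun y => y = r0.getD i 0)) = true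
    · rw [if_pos (by simpa using hiff.mpr hall), if_pos hall]
    · rw [if_neg (fun h => hall (hiff.mp (by simpa using h))), if_neg hall]
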